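-- pv_equiv track=rewrite | github.com/ReadyOS-C64/ReadyOs-Precog | build_support/readyshell_overlay_report.py | expand_make_vars
-- ===== SOURCE A (Python) =====
-- def expand_make_vars(raw: str) -> str:
--     replacements = {
--         "$(LIB_DIR)": "src/lib",
--         "$(READYSHELL_DIR)": "src/apps/readyshellpoc",
--         "$(READYSHELL_CORE_DIR)": "src/apps/readyshellpoc/core",
--         "$(READYSHELL_PLATFORM_DIR)": "src/apps/readyshellpoc/platform",
--         "$(READYSHELL_PLATFORM_C64_DIR)": "src/apps/readyshellpoc/platform/c64",
--         "$(OBJ_DIR)": "obj",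
--     }
--     out = raw
--     for src, dst in replacements.items():
--         out = out.replace(src, dst)
--     return out
-- ===== SOURCE B (Python) =====
-- def expand_make_vars(raw: str) -> str:
--     items = [
--         ("$(LIB_DIR)", "src/lib"),
--         ("$(READYSHELL_DIR)", "src/apps/readyshellpoc"),
--         ("$(READYSHELL_CORE_DIR)", "src/apps/readyshellpoc/core"),
--         ("$(READYSHELL_PLATFORM_DIR)", "src/apps/readyshellpoc/platform"),
--         ("$(READYSHELL_PLATFORM_C64_DIR)", "src/apps/readyshellpoc/platform/c64"),
--         ("$(OBJ_DIR)", "obj"),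
--     ]
--     out = []
--     i = 0
--     n = len(raw)
--     while i < n:
--         for src, dst in items:
--             if raw.startswith(src, i):
--                 out.append(dst)
--                 i += len(src)
--                 break
--         else:
--             out.append(raw[i])
--             i += 1
--     return "".join(out)
-- ===== Notes on version B (the rewrite author's own statement) =====
-- stated objective: alternative
-- what changed: A makes six sequential full-string .replace passes (one per Make variable); B makes a single left-to-right pass over the string, trying each key at the current position and emitting its value or the current character.
import Mathlib
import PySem

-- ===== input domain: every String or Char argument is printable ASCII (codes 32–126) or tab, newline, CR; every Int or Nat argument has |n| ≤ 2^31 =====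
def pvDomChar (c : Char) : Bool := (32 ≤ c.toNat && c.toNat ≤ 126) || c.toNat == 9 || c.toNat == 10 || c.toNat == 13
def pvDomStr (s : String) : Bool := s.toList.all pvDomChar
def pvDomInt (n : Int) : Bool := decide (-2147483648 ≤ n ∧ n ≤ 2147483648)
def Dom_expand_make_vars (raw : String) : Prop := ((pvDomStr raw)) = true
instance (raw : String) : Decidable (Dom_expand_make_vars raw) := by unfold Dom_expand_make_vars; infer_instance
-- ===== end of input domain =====

-- B replaces A's six sequential full-string .replace passes by one left-to-right scan that
-- tries each Make-variable key at every position (objective: alternative single-pass algorithm).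

-- ===== PORT A =====
def pvReplacements : List (String × String) :=
  [("$(LIB_DIR)", "src/lib"),
   ("$(READYSHELL_DIR)", "src/apps/readyshellpoc"),
   ("$(READYSHELL_CORE_DIR)", "src/apps/readyshellpoc/core"),
   ("$(READYSHELL_PLATFORM_DIR)", "src/apps/readyshellpoc/platform"),
   ("$(READYSHELL_PLATFORM_C64_DIR)", "src/apps/readyshellpoc/platform/c64"),
   ("$(OBJ_DIR)", "obj")]

def expand_make_vars (raw : String) : String :=
  pvReplacements.foldl (fun out sd => PySem.Str.replace out sd.1 sd.2) raw

-- ===== PORT B =====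
def pvItems : List (List Char × List Char) :=
  [("$(LIB_DIR)".toList, "src/lib".toList),
   ("$(READYSHELL_DIR)".toList, "src/apps/readyshellpoc".toList),
   ("$(READYSHELL_CORE_DIR)".toList, "src/apps/readyshellpoc/core".toList),
   ("$(READYSHELL_PLATFORM_DIR)".toList, "src/apps/readyshellpoc/platform".toList),
   ("$(READYSHELL_PLATFORM_C64_DIR)".toList, "src/apps/readyshellpoc/platform/c64".toList),
   ("$(OBJ_DIR)".toList, "obj".toList)]

-- single left-to-right pass of Source B's while loop; the fuel argument (start: input length)
-- only makes the recursion structural — every step consumes at least one character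
def pvScan (ps : List (List Char × List Char)) : Nat → List Char → List Char
  | _, [] => []
  | 0, l => l
  | fuel + 1, c :: t =>
    match ps.find? (fun sd => sd.1.isPrefixOf (c :: t)) with
    | some sd => sd.2 ++ pvScan ps fuel ((c :: t).drop sd.1.length)
    | none => c :: pvScan ps fuel t

def expand_make_vars_alt (raw : String) : String :=
  String.ofList (pvScan pvItems raw.toList.length raw.toList)

-- ===== PRECONDITION & SPEC =====
def Spec_expand_make_vars (raw : String) (out : String) : Prop := out = expand_make_vars_alt raw
instance (raw : String) (out : String) : Decidable (Spec_expand_make_vars raw out) := by unfold Spec_expand_make_vars; infer_instance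

-- ===== CLAIM (what is proved, stated in full; the proofs are below) =====
def Claim_equal_expand_make_vars : Prop := ∀ (raw : String), Dom_expand_make_vars raw → Spec_expand_make_vars raw (expand_make_vars raw)

-- ===== LEMMAS AND PROOFS =====

-- scan with canonical fuel
def S (ps : List (List Char × List Char)) (l : List Char) : List Char :=
  pvScan ps l.length l

-- fuel-free form of one Python str.replace pass (old nonempty on every use)
def rep (old new : List Char) (l : List Char) : List Char :=
  match l with
  | [] => []
  | c :: t =>
    if h : old ≠ [] ∧ old.isPrefixOf (c :: t) then
      new ++ rep old new ((c :: t).drop old.length)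
    else
      c :: rep old new t
  termination_by l.length
  decreasing_by
  · have : 0 < old.length := List.length_pos_iff.mpr h.1
    simp only [List.length_drop, List.length_cons]
    omega
  · simp

-- pattern p has no (complete or partial-from-inside) occurrence anywhere in block b:
-- at every start offset j the comparison fails already inside b
def NoOcc (p b : List Char) : Prop :=
  ∀ j, j < b.length → ∃ i, i < p.length ∧ j + i < b.length ∧ b[j + i]? ≠ p[i]?

-- no character of p equals the first character of any replacement value of ps
def HeadSafe (p : List Char) (ps : List (List Char × List Char)) : Prop :=
  ∀ kv ∈ ps, kv.2 ≠ [] ∧ ∀ j, j < p.length → p[j]? ≠ kv.2[0]?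

theorem mismatch_not_prefix {p m l : List Char}
    (h : ∃ i, i < p.length ∧ i < m.length ∧ m[i]? ≠ p[i]?) : ¬ p <+: (m ++ l) := by
  rintro ⟨t, ht⟩
  obtain ⟨i, hip, him, hne⟩ := h
  apply hne
  have h2 : (p ++ t)[i]? = p[i]? := List.getElem?_append_left hip
  rw [ht] at h2
  rw [List.getElem?_append_left him] at h2
  exact h2

theorem noOcc_tail {p : List Char} {c : Char} {b : List Char}
    (h : NoOcc p (c :: b)) : NoOcc p b := by
  intro j hj
  obtain ⟨i, hip, hib, hne⟩ := h (j + 1) (by simp; omega)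
  refine ⟨i, hip, by simp at hib; omega, ?_⟩
  have : (c :: b)[j + 1 + i]? = b[j + i]? := by
    have : j + 1 + i = (j + i) + 1 := by omega
    rw [this, List.getElem?_cons_succ]
  rwa [this] at hne

theorem noOcc_head_not_prefix {p : List Char} {c : Char} {b l : List Char}
    (h : NoOcc p (c :: b)) : ¬ p <+: ((c :: b) ++ l) := by
  apply mismatch_not_prefix
  obtain ⟨i, hip, hib, hne⟩ := h 0 (by simp)
  exact ⟨i, hip, by simpa using hib, by simpa using hne⟩

-- rep copies a block with no occurrence of its pattern verbatim
theorem rep_skip {p v : List Char} (b : List Char) {l : List Char}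
    (h : NoOcc p b) : rep p v (b ++ l) = b ++ rep p v l := by
  induction b with
  | nil => simp
  | cons c b' ih =>
    rw [List.cons_append, rep]
    have hnp : ¬ (p ≠ [] ∧ p.isPrefixOf (c :: (b' ++ l))) := by
      rintro ⟨-, hpre⟩
      exact noOcc_head_not_prefix h (List.isPrefixOf_iff_prefix.mp hpre)
    rw [dif_neg hnp, ih (noOcc_tail h)]
    simp

theorem rep_unfold_prefix {p v m : List Char} (hp : p ≠ []) (hpre : p <+: m) :
    rep p v m = v ++ rep p v (m.drop p.length) := by
  match m with
  | [] =>
    have := List.prefix_nil.mp hpre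
    exact absurd this hp
  | c :: t =>
    rw [rep, dif_pos ⟨hp, List.isPrefixOf_iff_prefix.mpr hpre⟩]

theorem rep_unfold_not_prefix {p v : List Char} {c : Char} {t : List Char}
    (hpre : ¬ p <+: (c :: t)) : rep p v (c :: t) = c :: rep p v t := by
  rw [rep, dif_neg]
  rintro ⟨-, h⟩
  exact hpre (List.isPrefixOf_iff_prefix.mp h)

-- fuel irrelevance of pvScan (keys nonempty)
theorem pvScan_fuel {ps : List (List Char × List Char)} (hks : ∀ kv ∈ ps, kv.1 ≠ []) :
    ∀ f1 f2 l, l.length ≤ f1 → l.length ≤ f2 → pvScan ps f1 l = pvScan ps f2 l := by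
  intro f1
  induction f1 with
  | zero =>
    intro f2 l h1 _
    have : l = [] := List.eq_nil_of_length_eq_zero (by omega)
    subst this
    simp [pvScan]
  | succ f1 ih =>
    intro f2 l h1 h2
    match l with
    | [] => simp [pvScan]
    | c :: t =>
      match f2 with
      | 0 => simp at h2
      | f2 + 1 =>
        rw [pvScan, pvScan]
        cases hf : ps.find? (fun sd => sd.1.isPrefixOf (c :: t)) with
        | none =>
          simp only
          rw [ih f2 t (by simp at h1 ⊢; omega) (by simp at h2 ⊢; omega)]
        | some sd =>
          simp only
          have hk : sd.1 ≠ [] := hks _ (List.mem_of_find?_eq_some hf)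
          have hlen : ((c :: t).drop sd.1.length).length ≤ t.length := by
            have : 0 < sd.1.length := List.length_pos_iff.mpr hk
            simp only [List.length_drop, List.length_cons]
            omega
          rw [ih f2 _ (by simp at h1; omega) (by simp at h2; omega)]

theorem S_eq_pvScan {ps : List (List Char × List Char)} (hks : ∀ kv ∈ ps, kv.1 ≠ [])
    {f : Nat} {l : List Char} (h : l.length ≤ f) : pvScan ps f l = S ps l :=
  pvScan_fuel hks f l.length l h le_rfl

theorem S_nil (ps : List (List Char × List Char)) : S ps [] = [] := by
  simp [S, pvScan]

theorem S_cons_none {ps : List (List Char × List Char)} {c : Char} {t : List Char}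
    (hf : ps.find? (fun sd => sd.1.isPrefixOf (c :: t)) = none) :
    S ps (c :: t) = c :: S ps t := by
  rw [S, List.length_cons, pvScan, hf]
  rfl

theorem S_cons_some {ps : List (List Char × List Char)} (hks : ∀ kv ∈ ps, kv.1 ≠ [])
    {c : Char} {t : List Char} {sd : List Char × List Char}
    (hf : ps.find? (fun sd => sd.1.isPrefixOf (c :: t)) = some sd) :
    S ps (c :: t) = sd.2 ++ S ps ((c :: t).drop sd.1.length) := by
  have hk : sd.1 ≠ [] := hks _ (List.mem_of_find?_eq_some hf)
  have hkl : 0 < sd.1.length := List.length_pos_iff.mpr hk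
  rw [S, List.length_cons, pvScan, hf]
  show sd.2 ++ pvScan ps t.length ((c :: t).drop sd.1.length) = _
  rw [S_eq_pvScan hks (by simp; omega)]

theorem S_empty (l : List Char) : S [] l = l := by
  induction l with
  | nil => exact S_nil []
  | cons c t ih => rw [S_cons_none (by simp), ih]

-- S copies a block in which no key of ps matches at any offset
theorem S_skip {ps : List (List Char × List Char)} (b : List Char) {l : List Char}
    (h : ∀ kv ∈ ps, NoOcc kv.1 b) : S ps (b ++ l) = b ++ S ps l := by
  induction b with
  | nil => simp
  | cons c b' ih =>
    rw [List.cons_append, S_cons_none, ih (fun kv hkv => noOcc_tail (h kv hkv))]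
    · simp
    · rw [List.find?_eq_none]
      intro kv hkv hp
      exact noOcc_head_not_prefix (h kv hkv) (List.isPrefixOf_iff_prefix.mp hp)

-- a prefix of the scan output that uses only characters p never shares with a value head
-- must already be a prefix of the input
theorem S_prefix_refl {p : List Char} {ps : List (List Char × List Char)}
    (hks : ∀ kv ∈ ps, kv.1 ≠ []) (hh : HeadSafe p ps) :
    ∀ n l, l.length ≤ n → ∀ j, p.drop j <+: S ps l → p.drop j <+: l := by
  intro n
  induction n with
  | zero =>
    intro l hl j hpre
    have : l = [] := List.eq_nil_of_length_eq_zero (by omega)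
    subst this
    rwa [S_nil] at hpre
  | succ n ih =>
    intro l hl j hpre
    match l with
    | [] => rwa [S_nil] at hpre
    | c :: t =>
      by_cases hj : p.length ≤ j
      · rw [List.drop_eq_nil_of_le hj] at hpre ⊢
        exact List.nil_prefix
      · have hj' : j < p.length := lt_of_not_ge hj
        cases hf : ps.find? (fun sd => sd.1.isPrefixOf (c :: t)) with
        | some sd =>
          rw [S_cons_some hks hf] at hpre
          obtain ⟨hv, hhd⟩ := hh _ (List.mem_of_find?_eq_some hf)
          exfalso
          apply hhd j hj'
          obtain ⟨u2, hu2⟩ := hpre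
          have h0 := congrArg (fun w : List Char => w[0]?) hu2
          simp only at h0
          rw [List.getElem?_append_left (by simp [List.length_drop]; omega),
              List.getElem?_append_left (List.length_pos_iff.mpr hv),
              List.getElem?_drop] at h0
          simpa using h0
        | none =>
          rw [S_cons_none hf] at hpre
          rw [List.drop_eq_getElem_cons hj'] at hpre ⊢
          rw [List.cons_prefix_cons] at hpre ⊢
          exact ⟨hpre.1, ih t (by simp at hl; omega) (j + 1) hpre.2⟩

-- one replace pass applied after scanning with key set ps equals scanning with the key appended
theorem step_scan (ps : List (List Char × List Char)) (p v : List Char)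
    (hp : p ≠ [])
    (hks : ∀ kv ∈ ps, kv.1 ≠ [])
    (hvals : ∀ kv ∈ ps, NoOcc p kv.2)
    (hkeys : ∀ kv ∈ ps, NoOcc kv.1 p)
    (hhead : HeadSafe p ps) :
    ∀ l, rep p v (S ps l) = S (ps ++ [(p, v)]) l := by
  have hks' : ∀ kv ∈ ps ++ [(p, v)], kv.1 ≠ [] := by
    intro kv hkv
    rcases List.mem_append.mp hkv with h | h
    · exact hks _ h
    · simp at h; subst h; exact hp
  suffices H : ∀ n l, l.length ≤ n → rep p v (S ps l) = S (ps ++ [(p, v)]) l by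
    intro l; exact H l.length l le_rfl
  intro n
  induction n with
  | zero =>
    intro l hl
    have : l = [] := List.eq_nil_of_length_eq_zero (by omega)
    subst this
    rw [S_nil, S_nil, rep]
  | succ n ih =>
    intro l hl
    match l with
    | [] => rw [S_nil, S_nil, rep]
    | c :: t =>
      cases hf : ps.find? (fun sd => sd.1.isPrefixOf (c :: t)) with
      | some sd =>
        have hmem := List.mem_of_find?_eq_some hf
        have hk : sd.1 ≠ [] := hks _ hmem
        have hklen : 0 < sd.1.length := List.length_pos_iff.mpr hk
        rw [S_cons_some hks hf, rep_skip sd.2 (hvals _ hmem),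
            ih _ (by simp at hl ⊢; omega)]
        have hf' : (ps ++ [(p, v)]).find? (fun sd => sd.1.isPrefixOf (c :: t)) = some sd := by
          rw [List.find?_append, hf]; rfl
        rw [S_cons_some hks' hf']
      | none =>
        by_cases hpre : p <+: (c :: t)
        · have hpre2 := hpre
          obtain ⟨u, hu⟩ := hpre2
          have hplen : 0 < p.length := List.length_pos_iff.mpr hp
          have hlenu : u.length ≤ n := by
            have h2 := congrArg List.length hu
            simp at h2 hl
            omega
          have hb : p.isPrefixOf (c :: t) = true := List.isPrefixOf_iff_prefix.mpr hpre
          have hf' : (ps ++ [(p, v)]).find? (fun sd => sd.1.isPrefixOf (c :: t)) = some (p, v) := by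
            rw [List.find?_append, hf, Option.none_or, List.find?, hb]
          have hdrop : (c :: t).drop (p, v).1.length = u := by
            show (c :: t).drop p.length = u
            rw [← hu, List.drop_left]
          rw [S_cons_some hks' hf', hdrop, ← hu, S_skip p hkeys,
              rep_unfold_prefix hp (List.prefix_append p (S ps u)), List.drop_left, ih u hlenu]
        · rw [S_cons_none hf]
          have hnp : ¬ p <+: (c :: S ps t) := by
            intro hcontra
            have : p <+: S ps (c :: t) := by rwa [S_cons_none hf]
            have := S_prefix_refl hks hhead (c :: t).length (c :: t) le_rfl 0 (by simpa using this)
            simp at this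
            exact hpre this
          rw [rep_unfold_not_prefix hnp, ih t (by simp at hl; omega)]
          have hb : p.isPrefixOf (c :: t) = false := by
            cases h : p.isPrefixOf (c :: t) with
            | false => rfl
            | true => exact absurd (List.isPrefixOf_iff_prefix.mp h) hpre
          have hf' : (ps ++ [(p, v)]).find? (fun sd => sd.1.isPrefixOf (c :: t)) = none := by
            rw [List.find?_append, hf, Option.none_or, List.find?, hb]
            rfl
          rw [S_cons_none hf']

theorem replace_eq_rep_go (old new : List Char) (hp : old ≠ []) :
    ∀ fuel l acc, l.length ≤ fuel →
      PySem.Chars.replace.go old new fuel l acc = acc.reverse ++ rep old new l := by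
  intro fuel
  induction fuel with
  | zero =>
    intro l acc hl
    have : l = [] := List.eq_nil_of_length_eq_zero (by omega)
    subst this
    rw [PySem.Chars.replace.go, rep]
  | succ fuel ih =>
    intro l acc hl
    match l with
    | [] => simp [PySem.Chars.replace.go, rep]
    | c :: t =>
      rw [PySem.Chars.replace.go]
      by_cases hpre : old.isPrefixOf (c :: t)
      · rw [if_pos hpre]
        have hplen : 0 < old.length := List.length_pos_iff.mpr hp
        rw [ih _ _ (by simp at hl ⊢; omega)]
        rw [rep, dif_pos ⟨hp, hpre⟩]
        simp
      · rw [if_neg hpre]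
        rw [ih t _ (by simp at hl; omega)]
        rw [rep_unfold_not_prefix (fun h => hpre (List.isPrefixOf_iff_prefix.mpr h))]
        simp

theorem replace_eq_rep (old new l : List Char) (hp : old ≠ []) :
    PySem.Chars.replace l old new = rep old new l := by
  rw [PySem.Chars.replace]
  rw [if_neg (by simp [List.isEmpty_iff]; exact hp)]
  have := replace_eq_rep_go old new hp l.length l [] le_rfl
  simpa using this

-- ===== VERDICT (by name: the statement is the Claim_ definition above) =====
theorem expand_make_vars_spec : Claim_equal_expand_make_vars := by
  intro raw _
  unfold Spec_expand_make_vars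
  have e1 : ∀ l, rep "$(LIB_DIR)".toList "src/lib".toList (S [] l) = S [("$(LIB_DIR)".toList, "src/lib".toList)] l :=
    step_scan [] "$(LIB_DIR)".toList "src/lib".toList (by decide) (by decide)
      (by simp only [NoOcc]; decide) (by simp only [NoOcc]; decide) (by simp only [HeadSafe]; decide)
  have e2 : ∀ l, rep "$(READYSHELL_DIR)".toList "src/apps/readyshellpoc".toList (S [("$(LIB_DIR)".toList, "src/lib".toList)] l) = S [("$(LIB_DIR)".toList, "src/lib".toList), ("$(READYSHELL_DIR)".toList, "src/apps/readyshellpoc".toList)] l :=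
    step_scan [("$(LIB_DIR)".toList, "src/lib".toList)] "$(READYSHELL_DIR)".toList "src/apps/readyshellpoc".toList (by decide) (by decide)
      (by simp only [NoOcc]; decide) (by simp only [NoOcc]; decide) (by simp only [HeadSafe]; decide)
  have e3 : ∀ l, rep "$(READYSHELL_CORE_DIR)".toList "src/apps/readyshellpoc/core".toList (S [("$(LIB_DIR)".toList, "src/lib".toList), ("$(READYSHELL_DIR)".toList, "src/apps/readyshellpoc".toList)] l) = S [("$(LIB_DIR)".toList, "src/lib".toList), ("$(READYSHELL_DIR)".toList, "src/apps/readyshellpoc".toList), ("$(READYSHELL_CORE_DIR)".toList, "src/apps/readyshellpoc/core".toList)] l :=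
    step_scan [("$(LIB_DIR)".toList, "src/lib".toList), ("$(READYSHELL_DIR)".toList, "src/apps/readyshellpoc".toList)] "$(READYSHELL_CORE_DIR)".toList "src/apps/readyshellpoc/core".toList (by decide) (by decide)
      (by simp only [NoOcc]; decide) (by simp only [NoOcc]; decide) (by simp only [HeadSafe]; decide)
  have e4 : ∀ l, rep "$(READYSHELL_PLATFORM_DIR)".toList "src/apps/readyshellpoc/platform".toList (S [("$(LIB_DIR)".toList, "src/lib".toList), ("$(READYSHELL_DIR)".toList, "src/apps/readyshellpoc".toList), ("$(READYSHELL_CORE_DIR)".toList, "src/apps/readyshellpoc/core".toList)] l) = S [("$(LIB_DIR)".toList, "src/lib".toList), ("$(READYSHELL_DIR)".toList, "src/apps/readyshellpoc".toList), ("$(READYSHELL_CORE_DIR)".toList, "src/apps/readyshellpoc/core".toList), ("$(READYSHELL_PLATFORM_DIR)".toList, "src/apps/readyshellpoc/platform".toList)] l :=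
    step_scan [("$(LIB_DIR)".toList, "src/lib".toList), ("$(READYSHELL_DIR)".toList, "src/apps/readyshellpoc".toList), ("$(READYSHELL_CORE_DIR)".toList, "src/apps/readyshellpoc/core".toList)] "$(READYSHELL_PLATFORM_DIR)".toList "src/apps/readyshellpoc/platform".toList (by decide) (by decide)
      (by simp only [NoOcc]; decide) (by simp only [NoOcc]; decide) (by simp only [HeadSafe]; decide)
  have e5 : ∀ l, rep "$(READYSHELL_PLATFORM_C64_DIR)".toList "src/apps/readyshellpoc/platform/c64".toList (S [("$(LIB_DIR)".toList, "src/lib".toList), ("$(READYSHELL_DIR)".toList, "src/apps/readyshellpoc".toList), ("$(READYSHELL_CORE_DIR)".toList, "src/apps/readyshellpoc/core".toList), ("$(READYSHELL_PLATFORM_DIR)".toList, "src/apps/readyshellpoc/platform".toList)] l) = S [("$(LIB_DIR)".toList, "src/lib".toList), ("$(READYSHELL_DIR)".toList, "src/apps/readyshellpoc".toList), ("$(READYSHELL_CORE_DIR)".toList, "src/apps/readyshellpoc/core".toList), ("$(READYSHELL_PLATFORM_DIR)".toList, "src/apps/readyshellpoc/platform".toList), ("$(READYSHELL_PLATFORM_C64_DIR)".toList,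 "src/apps/readyshellpoc/platform/c64".toList)] l :=
    step_scan [("$(LIB_DIR)".toList, "src/lib".toList), ("$(READYSHELL_DIR)".toList, "src/apps/readyshellpoc".toList), ("$(READYSHELL_CORE_DIR)".toList, "src/apps/readyshellpoc/core".toList), ("$(READYSHELL_PLATFORM_DIR)".toList, "src/apps/readyshellpoc/platform".toList)] "$(READYSHELL_PLATFORM_C64_DIR)".toList "src/apps/readyshellpoc/platform/c64".toList (by decide) (by decide)
      (by simp only [NoOcc]; decide) (by simp only [NoOcc]; decide) (by simp only [HeadSafe]; decide)
  have e6 : ∀ l, rep "$(OBJ_DIR)".toList "obj".toList (S [("$(LIB_DIR)".toList, "src/lib".toList), ("$(READYSHELL_DIR)".toList, "src/apps/readyshellpoc".toList), ("$(READYSHELL_CORE_DIR)".toList, "src/apps/readyshellpoc/core".toList), ("$(READYSHELL_PLATFORM_DIR)".toList, "src/apps/readyshellpoc/platform".toList), ("$(READYSHELL_PLATFORM_C64_DIR)".toList, "src/apps/readyshellpoc/platform/c64".toList)] l) = S [("$(LIB_DIR)".toList, "src/lib".toList), ("$(READYSHELL_DIR)".toList, "src/apps/readyshellpoc".toList), ("$(READYSHELL_CORE_DIR)".toList,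 "src/apps/readyshellpoc/core".toList), ("$(READYSHELL_PLATFORM_DIR)".toList, "src/apps/readyshellpoc/platform".toList), ("$(READYSHELL_PLATFORM_C64_DIR)".toList, "src/apps/readyshellpoc/platform/c64".toList), ("$(OBJ_DIR)".toList, "obj".toList)] l :=
    step_scan [("$(LIB_DIR)".toList, "src/lib".toList), ("$(READYSHELL_DIR)".toList, "src/apps/readyshellpoc".toList), ("$(READYSHELL_CORE_DIR)".toList, "src/apps/readyshellpoc/core".toList), ("$(READYSHELL_PLATFORM_DIR)".toList, "src/apps/readyshellpoc/platform".toList), ("$(READYSHELL_PLATFORM_C64_DIR)".toList, "src/apps/readyshellpoc/platform/c64".toList)] "$(OBJ_DIR)".toList "obj".toList (by decide) (by decide)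
      (by simp only [NoOcc]; decide) (by simp only [NoOcc]; decide) (by simp only [HeadSafe]; decide)
  have key : (expand_make_vars raw).toList = pvScan pvItems raw.toList.length raw.toList := by
    unfold expand_make_vars pvReplacements
    simp only [List.foldl_cons, List.foldl_nil, PySem.Str.toList_replace]
    rw [replace_eq_rep "$(LIB_DIR)".toList "src/lib".toList _ (by decide), replace_eq_rep "$(READYSHELL_DIR)".toList "src/apps/readyshellpoc".toList _ (by decide), replace_eq_rep "$(READYSHELL_CORE_DIR)".toList "src/apps/readyshellpoc/core".toList _ (by decide), replace_eq_rep "$(READYSHELL_PLATFORM_DIR)".toList "src/apps/readyshellpoc/platform".toList _ (by decide), replace_eq_rep "$(READYSHELL_PLATFORM_C64_DIR)".toList "src/apps/readyshellpoc/platform/c64".toList _ (by decide), replace_eq_rep "$(OBJ_DIR)".toList "obj".toList _ (by decide)]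
    conv_lhs => rw [← S_empty raw.toList]
    rw [e1, e2, e3, e4, e5, e6]
    rfl
  calc expand_make_vars raw = String.ofList (expand_make_vars raw).toList := String.ofList_toList.symm
    _ = expand_make_vars_alt raw := by rw [key]; rfl
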